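-- pv_equiv track=rewrite | github.com/pse0418/Algorithm | Programmers/Stack, Queue/주식가격.py | solution
-- ===== SOURCE A (Python) =====
-- from collections import deque
--
-- def solution(prices):
--     answer = []
--     prices = deque(prices)
--
--     while(prices):
--         count = 0
--         price = prices.popleft()
--         for i in prices:
--             count += 1
--             if price > i:
--                 break
--         answer.append(count)
--
--     return answer
-- ===== SOURCE B (Python) =====
-- def solution(prices):
--     # O(n) monotonic stack, scanning right-to-left; stack holds (price, index)
--     # with strictly increasing prices from the top, so the top after popping
--     # everything >= p is the nearest index to the right with a smaller price.
--     n = len(prices)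
--     answer = []
--     stack = []
--     for i, p in reversed(list(enumerate(prices))):
--         while stack and stack[-1][0] >= p:
--             stack.pop()
--         answer.append(stack[-1][1] - i if stack else n - 1 - i)
--         stack.append((p, i))
--     answer.reverse()
--     return answer
-- ===== Notes on version B (the rewrite author's own statement) =====
-- stated objective: faster
-- what changed: Replaced A's per-element rescan of the remaining deque with a single right-to-left pass keeping a monotonic stack of (price, index), so each element is pushed and popped at most once.
import Mathlib
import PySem

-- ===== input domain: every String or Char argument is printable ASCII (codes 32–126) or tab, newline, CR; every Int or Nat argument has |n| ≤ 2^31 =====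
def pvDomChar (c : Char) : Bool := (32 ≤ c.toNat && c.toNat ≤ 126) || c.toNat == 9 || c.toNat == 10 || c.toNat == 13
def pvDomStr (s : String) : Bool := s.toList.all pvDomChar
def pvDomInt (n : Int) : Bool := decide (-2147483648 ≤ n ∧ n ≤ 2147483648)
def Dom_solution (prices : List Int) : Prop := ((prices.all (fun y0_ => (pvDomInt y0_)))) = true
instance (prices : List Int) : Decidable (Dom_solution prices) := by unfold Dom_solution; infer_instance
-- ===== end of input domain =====

-- B replaces A's O(n^2) rescans with an O(n) right-to-left monotonic stack.


-- ===== PORT A =====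
-- A's inner 'for i in prices: count += 1; if price > i: break'
def countDrop (price : Int) : List Int → Int
  | [] => 0
  | x :: xs => if price > x then 1 else 1 + countDrop price xs

-- A's 'while prices: price = prices.popleft(); … answer.append(count)'
def solution (prices : List Int) : List Int :=
  match prices with
  | [] => []
  | p :: rest => countDrop p rest :: solution rest

-- ===== PORT B =====
-- one iteration of B's loop body: pop the stack while its top price is ≥ p,
-- append the answer for index i, push (p, i)
def stepB (n : Int) (acc : List (Int × Int) × List Int) (ip : Int × Int) :
    List (Int × Int) × List Int :=
  let st := acc.1.dropWhile (fun e => e.1 ≥ ip.2)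
  let a : Int := match st with
    | [] => n - 1 - ip.1
    | e :: _ => e.2 - ip.1
  ((ip.2, ip.1) :: st, acc.2 ++ [a])

def solution_alt (prices : List Int) : List Int :=
  let n : Int := prices.length
  (((PySem.List.enumerate prices 0).reverse.foldl (stepB n) ([], [])).2).reverse

-- ===== PRECONDITION & SPEC =====
def Spec_solution (prices : List Int) (out : List Int) : Prop := out = solution_alt prices
instance (prices : List Int) (out : List Int) : Decidable (Spec_solution prices out) := by unfold Spec_solution; infer_instance

-- ===== CLAIM (what is proved, stated in full; the proofs are below) =====
def Claim_equal_solution : Prop := ∀ (prices : List Int), Dom_solution prices → Spec_solution prices (solution prices)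

-- ===== LEMMAS AND PROOFS =====

-- a weaker dropWhile (≥ q) absorbs a stronger dropWhile (≥ p)
theorem dropWhile_ge_absorb (q p : Int) (hqp : q ≤ p) :
    ∀ (st : List (Int × Int)),
      (st.dropWhile (fun e => e.1 ≥ p)).dropWhile (fun e => e.1 ≥ q)
        = st.dropWhile (fun e => e.1 ≥ q) := by
  intro st
  induction st with
  | nil => rfl
  | cons e st ih =>
    by_cases h : e.1 ≥ p
    · have hq : e.1 ≥ q := le_trans hqp h
      simp [List.dropWhile, h, hq, ih]
    · simp [List.dropWhile, h]

-- the stack after processing the suffix xs (which starts at absolute index k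
-- in a list of total length n) answers every countDrop query about xs, and
-- the accumulated answers, reversed, are exactly A's answers for xs
theorem main_inv : ∀ (xs : List Int) (k n : Int), n = k + xs.length →
    (∀ q : Int, countDrop q xs =
      (match ((PySem.List.enumerate xs k).reverse.foldl (stepB n) ([], [])).1.dropWhile
          (fun e => e.1 ≥ q) with
        | [] => (xs.length : Int)
        | e :: _ => e.2 - k + 1)) ∧
    (((PySem.List.enumerate xs k).reverse.foldl (stepB n) ([], [])).2).reverse = solution xs := by
  intro xs
  induction xs with
  | nil =>
    intro k n _
    constructor
    · intro q; simp [PySem.List.enumerate, countDrop]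
    · simp [PySem.List.enumerate, solution]
  | cons p xs ih =>
    intro k n hn
    have hn' : n = (k + 1) + xs.length := by
      simp only [List.length_cons] at hn; push_cast at hn ⊢; omega
    obtain ⟨ihst, ihans⟩ := ih (k + 1) n hn'
    have hfold :
        (PySem.List.enumerate (p :: xs) k).reverse.foldl (stepB n) ([], [])
          = stepB n ((PySem.List.enumerate xs (k + 1)).reverse.foldl (stepB n) ([], [])) (k, p) := by
      simp [PySem.List.enumerate_cons]
    set r := (PySem.List.enumerate xs (k + 1)).reverse.foldl (stepB n) ([], []) with hr
    -- the answer appended for index k equals countDrop p xs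
    have ha :
        (match r.1.dropWhile (fun e => e.1 ≥ p) with
          | [] => n - 1 - k
          | e :: _ => e.2 - k) = countDrop p xs := by
      have hthis := ihst p
      cases hdp : r.1.dropWhile (fun e => e.1 ≥ p) with
      | nil => rw [hthis, hdp, hn']; simp; ring
      | cons e st' => rw [hthis, hdp]; simp; ring
    constructor
    · intro q
      rw [hfold]
      by_cases hq : p ≥ q
      · -- (p, k) is popped by dropWhile (≥ q); absorption reduces to the old stack
        have hnlt : ¬ p < q := not_lt.mpr hq
        have habs := dropWhile_ge_absorb q p hq r.1
        have hthis := ihst q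
        simp only [stepB, List.dropWhile_cons]
        rw [if_pos (by simpa using hq), habs]
        cases hdq : r.1.dropWhile (fun e => e.1 ≥ q) with
        | nil =>
          rw [hdq] at hthis
          simp only at hthis
          simp only [countDrop, if_neg hnlt, hthis, List.length_cons]
          push_cast; ring
        | cons e st' =>
          rw [hdq] at hthis
          simp only at hthis
          simp only [countDrop, if_neg hnlt, hthis]
          ring
      · -- (p, k) stays on top: the drop happens immediately at distance 1
        have hlt : p < q := lt_of_not_ge hq
        simp only [stepB, List.dropWhile_cons]
        rw [if_neg (by simpa using hq)]
        simp [countDrop, hlt]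
    · rw [hfold]
      simp only [stepB]
      rw [List.reverse_append]
      simp only [List.reverse_cons, List.reverse_nil, List.nil_append, List.singleton_append]
      rw [ihans, ha]
      rfl

-- ===== VERDICT (by name: the statement is the Claim_ definition above) =====
theorem solution_spec : Claim_equal_solution := by
  intro prices _
  unfold Spec_solution solution_alt
  exact ((main_inv prices 0 prices.length (by simp)).2).symm
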